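-- pv_equiv track=rewrite | github.com/MatthewDaws/AdventCode23 | advent/fourteen.py | tilt_col
-- ===== SOURCE A (Python) =====
-- def tilt_col(col):
--     tilted = []
--     i, count, rocks = 0, 0, 0
--     while i < len(col):
--         if col[i] == "#":
--             tilted.extend(["O"]*rocks)
--             tilted.extend(["."]*(count-rocks))
--             tilted.append("#")
--             count, rocks = 0, 0
--         else:
--             count += 1
--             if col[i] == "O":
--                 rocks += 1
--         i += 1
--     if count > 0:
--         tilted.extend(["O"]*rocks)
--         tilted.extend(["."]*(count-rocks))
--     return "".join(tilted)
-- ===== SOURCE B (Python) =====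
-- def tilt_col(col):
--     out = []
--     for seg in col.split("#"):
--         r = seg.count("O")
--         out.append("O" * r + "." * (len(seg) - r))
--     return "#".join(out)
-- ===== Notes on version B (the rewrite author's own statement) =====
-- stated objective: simpler
-- what changed: Replaced A's single stateful character scan (count/rocks accumulators flushed at each wall) with a split-on-walls, rebuild-each-segment-from-its-rock-count, join decomposition.
import Mathlib
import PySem

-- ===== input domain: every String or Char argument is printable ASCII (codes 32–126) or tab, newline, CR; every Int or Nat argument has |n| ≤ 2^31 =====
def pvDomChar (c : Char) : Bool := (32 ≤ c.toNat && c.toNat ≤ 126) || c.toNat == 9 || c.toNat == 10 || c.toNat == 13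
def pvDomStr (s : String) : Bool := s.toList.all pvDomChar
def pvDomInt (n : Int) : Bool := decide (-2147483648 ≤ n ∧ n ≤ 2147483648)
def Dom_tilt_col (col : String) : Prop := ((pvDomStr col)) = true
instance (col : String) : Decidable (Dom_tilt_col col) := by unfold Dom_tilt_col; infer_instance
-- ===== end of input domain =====

-- B changes the decomposition: split on '#', rebuild each segment, join — instead of A's stateful scan. Objective: simpler.

-- ===== PORT A =====
-- A's while loop over col[i] with state (count, rocks, tilted), flushed at each '#'
-- and once more at the end; ported as structural recursion over the character list.
def tiltLoop : List Char → Nat → Nat → List Char → List Char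
  | [], count, rocks, tilted =>
      if count > 0 then tilted ++ List.replicate rocks 'O' ++ List.replicate (count - rocks) '.'
      else tilted
  | c :: cs, count, rocks, tilted =>
      if c = '#' then
        tiltLoop cs 0 0 (tilted ++ List.replicate rocks 'O' ++ List.replicate (count - rocks) '.' ++ ['#'])
      else
        tiltLoop cs (count + 1) (rocks + if c = 'O' then 1 else 0) tilted

def tilt_col (col : String) : String := String.ofList (tiltLoop col.toList 0 0 [])

-- ===== PORT B =====
-- col.split("#"), ported by hand (exact for the single-char separator '#')
def splitHash : List Char → List (List Char)
  | [] => [[]]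
  | c :: cs =>
      match splitHash cs with
      | [] => [[]]
      | s :: ss => if c = '#' then [] :: s :: ss else (c :: s) :: ss

-- "O"*r + "."*(len(seg)-r) with r = seg.count("O")
def segFix (s : List Char) : List Char :=
  List.replicate (s.count 'O') 'O' ++ List.replicate (s.length - s.count 'O') '.'

-- "#".join(out), ported by hand
def joinHash : List (List Char) → List Char
  | [] => []
  | [s] => s
  | s :: ss => s ++ '#' :: joinHash ss

def tilt_col_alt (col : String) : String := String.ofList (joinHash ((splitHash col.toList).map segFix))

-- ===== PRECONDITION & SPEC =====
def Spec_tilt_col (col : String) (out : String) : Prop := out = tilt_col_alt col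
instance (col : String) (out : String) : Decidable (Spec_tilt_col col out) := by unfold Spec_tilt_col; infer_instance

-- ===== CLAIM (what is proved, stated in full; the proofs are below) =====
def Claim_equal_tilt_col : Prop := ∀ (col : String), Dom_tilt_col col → Spec_tilt_col col (tilt_col col)

-- ===== LEMMAS AND PROOFS =====

-- A's loop without the accumulator
def tiltG : List Char → Nat → Nat → List Char
  | [], count, rocks =>
      if count > 0 then List.replicate rocks 'O' ++ List.replicate (count - rocks) '.'
      else []
  | c :: cs, count, rocks =>
      if c = '#' then
        List.replicate rocks 'O' ++ List.replicate (count - rocks) '.' ++ '#' :: tiltG cs 0 0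
      else
        tiltG cs (count + 1) (rocks + if c = 'O' then 1 else 0)

theorem tiltLoop_eq_append (l : List Char) :
    ∀ count rocks tilted, tiltLoop l count rocks tilted = tilted ++ tiltG l count rocks := by
  induction l with
  | nil =>
      intro count rocks tilted
      simp only [tiltLoop, tiltG]
      split <;> simp
  | cons c cs ih =>
      intro count rocks tilted
      simp only [tiltLoop, tiltG]
      split
      · rw [ih]; simp
      · rw [ih]

theorem splitHash_ne_nil (l : List Char) : splitHash l ≠ [] := by
  cases l with
  | nil => simp [splitHash]
  | cons c cs =>
      simp only [splitHash]
      rcases splitHash cs with _ | ⟨s, ss⟩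
      · simp
      · by_cases hc : c = '#' <;> simp [hc]

-- segment rebuilt with the pending (count, rocks) state folded in
def segFix2 (count rocks : Nat) (s : List Char) : List Char :=
  List.replicate (rocks + s.count 'O') 'O' ++
  List.replicate ((count - rocks) + (s.length - s.count 'O')) '.'

theorem segFix2_zero (s : List Char) : segFix2 0 0 s = segFix s := by
  simp [segFix2, segFix]

theorem tiltG_eq (l : List Char) : ∀ count rocks, rocks ≤ count →
    tiltG l count rocks =
      match splitHash l with
      | [] => []
      | s :: ss => joinHash (segFix2 count rocks s :: ss.map segFix) := by
  induction l with
  | nil =>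
      intro count rocks hle
      simp only [tiltG, splitHash, List.map, joinHash, segFix2]
      split
      · simp
      · have hc : count = 0 := by omega
        have hr : rocks = 0 := by omega
        simp [hc, hr]
  | cons c cs ih =>
      intro count rocks hle
      rcases h : splitHash cs with _ | ⟨s, ss⟩
      · exact absurd h (splitHash_ne_nil cs)
      · by_cases hc : c = '#'
        · subst hc
          simp only [tiltG, splitHash, h, reduceIte]
          rw [ih 0 0 (le_refl 0), h]
          dsimp only
          rw [segFix2_zero]
          show _ = segFix2 count rocks [] ++ '#' :: joinHash (segFix s :: List.map segFix ss)
          simp [segFix2]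
        · simp only [tiltG, splitHash, h, if_neg hc]
          rw [ih (count + 1) (rocks + if c = 'O' then 1 else 0) (by split <;> omega), h]
          dsimp only
          congr 1
          have hcount : (c :: s).count 'O' = s.count 'O' + (if c = 'O' then 1 else 0) := by
            simp [List.count_cons]
          have hlen : s.count 'O' ≤ s.length := List.count_le_length
          simp only [segFix2, hcount, List.length_cons]
          have h1 : rocks + (if c = 'O' then 1 else 0) + s.count 'O'
              = rocks + (s.count 'O' + (if c = 'O' then 1 else 0)) := by omega
          have h2 : (count + 1 - (rocks + (if c = 'O' then 1 else 0))) + (s.length - s.count 'O')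
              = (count - rocks) + (s.length + 1 - (s.count 'O' + (if c = 'O' then 1 else 0))) := by
            split <;> omega
          rw [h1, h2]

-- ===== VERDICT (by name: the statement is the Claim_ definition above) =====
theorem tilt_col_spec : Claim_equal_tilt_col := by
  intro col _
  show tilt_col col = tilt_col_alt col
  unfold tilt_col tilt_col_alt
  rw [tiltLoop_eq_append, List.nil_append, tiltG_eq col.toList 0 0 (le_refl 0)]
  rcases h : splitHash col.toList with _ | ⟨s, ss⟩
  · exact absurd h (splitHash_ne_nil _)
  · simp [segFix2_zero]
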